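-- pv_equiv track=rewrite | github.com/vadimx30/SpecialistPython1 | Module5/practice/m5_t2.py | nechet
-- ===== SOURCE A (Python) =====
-- def nechet(a: int) -> list:
--     """Строка по нечетным"""
--     i = 0
--     result = []
--     while i < a:
--         if i % 2:
--             result.append(1)
--         else:
--             result.append(0)
--         i += 1
--     return result
-- ===== SOURCE B (Python) =====
-- def nechet(a: int) -> list:
--     """Строка по нечетным"""
--     return ([0, 1] * ((a + 1) // 2))[:a]
-- ===== Notes on version B (the rewrite author's own statement) =====
-- stated objective: simpler
-- what changed: Replaces the index-by-index while loop with a parity branch by a single expression that tiles the [0, 1] pattern and truncates it with a slice.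
import Mathlib
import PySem

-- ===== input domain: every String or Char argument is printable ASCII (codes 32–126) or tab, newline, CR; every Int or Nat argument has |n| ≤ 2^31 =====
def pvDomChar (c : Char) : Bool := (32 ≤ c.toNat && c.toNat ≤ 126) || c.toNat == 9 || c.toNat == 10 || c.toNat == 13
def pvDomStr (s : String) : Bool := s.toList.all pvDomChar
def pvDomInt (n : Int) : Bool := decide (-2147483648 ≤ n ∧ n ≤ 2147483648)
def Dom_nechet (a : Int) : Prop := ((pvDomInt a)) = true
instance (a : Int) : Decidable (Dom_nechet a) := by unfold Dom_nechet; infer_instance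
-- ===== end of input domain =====

-- B builds the list by tiling [0, 1] and truncating with a slice instead of a per-index parity loop (simpler).

-- ===== PORT A =====
-- the while-loop: i counts up, result accumulates 0/1 by parity of i
def nechetLoop (a i : Int) (result : List Int) : List Int :=
  if i < a then
    nechetLoop a (i + 1) (result ++ [if PySem.Int.mod i 2 ≠ 0 then (1 : Int) else 0])
  else result
termination_by (a - i).toNat
decreasing_by omega

def nechet (a : Int) : List Int := nechetLoop a 0 []

-- ===== PORT B =====
def nechet_alt (a : Int) : List Int :=
  PySem.List.slice (PySem.List.pyRepeat [0, 1] (PySem.Int.floordiv (a + 1) 2)) none (some a)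

-- ===== PRECONDITION & SPEC =====
def Spec_nechet (a : Int) (out : List Int) : Prop := out = nechet_alt a
instance (a : Int) (out : List Int) : Decidable (Spec_nechet a out) := by unfold Spec_nechet; infer_instance

-- ===== CLAIM (what is proved, stated in full; the proofs are below) =====
def Claim_equal_nechet : Prop := ∀ (a : Int), Dom_nechet a → Spec_nechet a (nechet a)

-- ===== LEMMAS AND PROOFS =====

-- the alternating pattern both programs produce
def pat (n : Nat) : List Int := (List.range n).map (fun (j : Nat) => (j : Int) % 2)

theorem pat_zero : pat 0 = [] := rfl

-- A's loop unrolled: it appends the pattern shifted by i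
theorem nechetLoop_eq (n : Nat) : ∀ (a i : Int) (res : List Int), (a - i).toNat = n →
    nechetLoop a i res =
      res ++ (List.range n).map (fun (j : Nat) => if PySem.Int.mod (i + (j : Int)) 2 ≠ 0 then (1 : Int) else 0) := by
  induction n with
  | zero =>
    intro a i res h
    rw [nechetLoop]
    simp only [List.range_zero, List.map_nil, List.append_nil]
    rw [if_neg (by omega)]
  | succ n ih =>
    intro a i res h
    rw [nechetLoop, if_pos (by omega)]
    rw [ih a (i + 1) _ (by omega)]
    have : n + 1 = 1 + n := by omega
    rw [this, List.range_add, List.map_append, List.map_map]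
    simp only [List.range_one, List.map_cons, List.map_nil, List.append_assoc, List.cons_append,
      List.nil_append]
    congr 2
    · norm_num
    · apply List.map_congr_left
      intro j _
      simp only [Function.comp_apply]
      have hc : i + 1 + (j : Int) = i + ((1 + j : Nat) : Int) := by push_cast; ring
      rw [hc]

-- Python's x % 2 (fmod) is Lean's emod (the divisor is positive)
theorem fmod_two (x : Int) : x.fmod 2 = x % 2 := by
  rw [Int.fmod_eq_emod_of_nonneg _ (by norm_num)]

theorem nechet_eq_pat (a : Int) : nechet a = pat a.toNat := by
  unfold nechet pat
  rw [nechetLoop_eq a.toNat a 0 [] (by omega)]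
  simp only [List.nil_append]
  apply List.map_congr_left
  intro j hj
  simp only [List.mem_range] at hj
  simp only [Int.zero_add, PySem.Int.mod]
  rw [fmod_two]
  rcases Int.emod_two_eq (j : Int) with h | h <;> rw [h] <;> simp

-- the flattened tiling of [0,1] is the pattern of even length
theorem flatten_replicate_pair (k : Nat) :
    (List.replicate k ([0, 1] : List Int)).flatten = pat (2 * k) := by
  induction k with
  | zero => rfl
  | succ k ih =>
    rw [List.replicate_succ, List.flatten_cons, ih]
    unfold pat
    have : 2 * (k + 1) = 2 + 2 * k := by omega
    rw [this, List.range_add, List.map_append, List.map_map]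
    congr 1
    apply List.map_congr_left
    intro j _
    simp only [Function.comp_apply]
    push_cast
    omega

theorem nechet_alt_eq_pat (a : Int) : nechet_alt a = pat a.toNat := by
  unfold nechet_alt
  rw [PySem.List.pyRepeat, PySem.Int.floordiv]
  by_cases ha : 0 ≤ a
  · rw [PySem.List.slice_to _ ha, flatten_replicate_pair]
    unfold pat
    rw [← List.map_take, List.take_range]
    congr 1
    rw [show (a + 1).fdiv 2 = (a + 1) / 2 from by rw [Int.fdiv_eq_ediv]; simp]
    congr 1
    omega
  · have hfd : (a + 1).fdiv 2 = (a + 1) / 2 := by rw [Int.fdiv_eq_ediv]; simp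
    have h0 : ((a + 1).fdiv 2).toNat = 0 := by omega
    rw [h0]
    simp only [List.replicate_zero, List.flatten_nil]
    have : a.toNat = 0 := by omega
    rw [this, pat_zero]
    rw [List.eq_nil_iff_forall_not_mem]
    intro x hx
    exact absurd (PySem.List.mem_of_mem_slice _ _ _ hx) (by simp)

-- ===== VERDICT (by name: the statement is the Claim_ definition above) =====
theorem nechet_spec : Claim_equal_nechet := by
  intro a _
  unfold Spec_nechet
  rw [nechet_eq_pat, nechet_alt_eq_pat]
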